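-- pv_equiv track=rewrite | github.com/elufowojud/class-projects | 5th assesed.py | fun4
-- ===== SOURCE A (Python) =====
-- def fun4(U, E, C):
--     covered = []
--     for Ei in C:
--         for u in Ei:
--             if not u in covered:
--                 covered.append(u)
--     score = len(C)
--     for u in U:
--         if not u in covered:
--             score = score + (len(E) + 1)
--     best_C = C.copy()
--     best_score = score
--     for Ei in E:
--         new_C = C.copy()
--         if Ei in C:
--             new_C.remove(Ei)
--         else:
--             new_C.append(Ei)
--         covered = []
--         for Ej in new_C:
--             for u in Ej:
--                 if not u in covered:
--                     covered.append(u)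
--         score = len(new_C)
--         for u in U:
--             if not u in covered:
--                 score = score + (len(E) + 1)
--         if score < best_score:
--             best_C = new_C.copy()
--             best_score = score
--     return best_C
-- ===== SOURCE B (Python) =====
-- def fun4(U, E, C):
--     # Incremental coverage counts: build per-element cover counts from C once,
--     # then score each single-set toggle by adjusting the uncovered count.
--     cnt = {}
--     for Ej in C:
--         for u in dict.fromkeys(Ej):
--             cnt[u] = cnt.get(u, 0) + 1
--     base_uncov = sum(1 for u in U if cnt.get(u, 0) == 0)
--     w = len(E) + 1
--     best_i = -1
--     best_score = len(C) + w * base_uncov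
--     for i, Ei in enumerate(E):
--         s = set(Ei)
--         if Ei in C:
--             uncov = base_uncov + sum(1 for u in U if u in s and cnt.get(u, 0) == 1)
--             sc = len(C) - 1 + w * uncov
--         else:
--             uncov = base_uncov - sum(1 for u in U if u in s and cnt.get(u, 0) == 0)
--             sc = len(C) + 1 + w * uncov
--         if sc < best_score:
--             best_i, best_score = i, sc
--     if best_i < 0:
--         return C.copy()
--     Ei = E[best_i]
--     if Ei in C:
--         out = C.copy()
--         out.remove(Ei)
--         return out
--     return C + [Ei]
-- ===== Notes on version B (the rewrite author's own statement) =====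
-- stated objective: faster
-- what changed: Instead of rebuilding the deduplicated covered list and rescanning it for every candidate toggle, B builds per-element cover counts from C once and scores each toggle incrementally with set membership and count-1/count-0 tests, tracking only the best index and materialising the toggled cover at the end.
import Mathlib
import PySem

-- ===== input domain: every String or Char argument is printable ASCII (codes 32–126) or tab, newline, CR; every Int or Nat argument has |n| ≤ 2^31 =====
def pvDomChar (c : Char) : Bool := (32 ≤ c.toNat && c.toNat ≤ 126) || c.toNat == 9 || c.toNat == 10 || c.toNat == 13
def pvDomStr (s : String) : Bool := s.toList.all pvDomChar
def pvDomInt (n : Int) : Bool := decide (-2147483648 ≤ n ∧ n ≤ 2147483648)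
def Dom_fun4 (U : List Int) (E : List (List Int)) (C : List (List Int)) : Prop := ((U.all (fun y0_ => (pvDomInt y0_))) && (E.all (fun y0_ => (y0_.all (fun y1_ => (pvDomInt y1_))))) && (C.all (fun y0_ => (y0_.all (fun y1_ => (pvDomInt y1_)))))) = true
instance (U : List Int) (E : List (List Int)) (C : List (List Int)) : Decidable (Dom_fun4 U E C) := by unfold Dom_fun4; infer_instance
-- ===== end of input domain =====

-- B replaces A's per-candidate rebuild of the deduplicated covered list by cover
-- counts computed once from C and adjusted incrementally per toggle (objective: faster).

-- ===== PORT A =====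
-- the repeated 'covered = []; for Ej in D: for u in Ej: if not u in covered: covered.append(u)' block
def pvCoveredA (D : List (List Int)) : List Int :=
  D.foldl (fun cov Ej => Ej.foldl (fun cov u => if u ∈ cov then cov else cov ++ [u]) cov) []

-- the repeated 'score = len(D); for u in U: if not u in covered: score += len(E)+1' block
def pvScoreA (U : List Int) (w : Int) (cov : List Int) (init : Int) : Int :=
  U.foldl (fun s u => if u ∈ cov then s else s + w) init

def fun4 (U : List Int) (E : List (List Int)) (C : List (List Int)) : List (List Int) :=
  let covered0 := pvCoveredA C
  let score0 := pvScoreA U ((E.length : Int) + 1) covered0 (C.length : Int)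
  let res := E.foldl (fun (st : List (List Int) × Int) Ei =>
    let newC := if Ei ∈ C then (PySem.List.remove? C Ei).getD C else C ++ [Ei]
    let covered := pvCoveredA newC
    let score := pvScoreA U ((E.length : Int) + 1) covered (newC.length : Int)
    if score < st.2 then (newC, score) else st) (C, score0)
  res.1

-- ===== PORT B =====
-- 'cnt = {}; for Ej in C: for u in dict.fromkeys(Ej): cnt[u] = cnt.get(u, 0) + 1'
def pvCntB (C : List (List Int)) : PySem.Dict Int Int :=
  C.foldl (fun d Ej => (PySem.List.dedup Ej).foldl (fun d u => d.insert u (d.getD u 0 + 1)) d)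
    PySem.Dict.empty

def fun4_alt (U : List Int) (E : List (List Int)) (C : List (List Int)) : List (List Int) :=
  let cnt := pvCntB C
  let baseUncov : Int := U.foldl (fun n u => if cnt.getD u 0 = 0 then n + 1 else n) 0
  let w : Int := (E.length : Int) + 1
  let best : Int × Int := (PySem.List.enumerate E).foldl (fun (st : Int × Int) p =>
    let s : PySem.Set Int := PySem.Set.ofList p.2
    let sc : Int :=
      if p.2 ∈ C then
        (C.length : Int) - 1 +
          w * (baseUncov + U.foldl (fun n u => if u ∈ s ∧ cnt.getD u 0 = 1 then n + 1 else n) 0)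
      else
        (C.length : Int) + 1 +
          w * (baseUncov - U.foldl (fun n u => if u ∈ s ∧ cnt.getD u 0 = 0 then n + 1 else n) 0)
    if sc < st.2 then (p.1, sc) else st) (-1, (C.length : Int) + w * baseUncov)
  if best.1 < 0 then C
  else
    let Ei := (PySem.List.pyGet? E best.1).getD []
    if Ei ∈ C then (PySem.List.remove? C Ei).getD C else C ++ [Ei]

-- ===== PRECONDITION & SPEC =====
def Spec_fun4 (U : List Int) (E : List (List Int)) (C : List (List Int)) (out : List (List Int)) : Prop := out = fun4_alt U E C
instance (U : List Int) (E : List (List Int)) (C : List (List Int)) (out : List (List Int)) : Decidable (Spec_fun4 U E C out) := by unfold Spec_fun4; infer_instance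

-- ===== CLAIM (what is proved, stated in full; the proofs are below) =====
def Claim_equal_fun4 : Prop := ∀ (U : List Int) (E : List (List Int)) (C : List (List Int)), Dom_fun4 U E C → Spec_fun4 U E C (fun4 U E C)

-- ===== LEMMAS AND PROOFS =====

/-- number of sets of `D` containing `u` -/
def pvCnt (D : List (List Int)) (u : Int) : Nat := D.countP (fun Ej => decide (u ∈ Ej))

/-- multiplicity-counted uncovered elements of `U` under cover `D` -/
def pvUncov (U : List Int) (D : List (List Int)) : Nat :=
  U.countP (fun u => decide (pvCnt D u = 0))

/-- the toggled cover A builds for candidate `Ei` -/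
def pvToggle (C : List (List Int)) (Ei : List Int) : List (List Int) :=
  if Ei ∈ C then (PySem.List.remove? C Ei).getD C else C ++ [Ei]

lemma mem_dedup_fold (l : List Int) (s : List Int) (x : Int) :
    x ∈ l.foldl (fun cov u => if u ∈ cov then cov else cov ++ [u]) s ↔ x ∈ s ∨ x ∈ l := by
  induction l generalizing s with
  | nil => simp
  | cons u l ih =>
    simp only [List.foldl_cons, ih]
    by_cases h : u ∈ s
    · simp only [if_pos h, List.mem_cons]
      by_cases hx : x = u
      · subst hx; tauto
      · tauto
    · simp only [if_neg h, List.mem_append, List.mem_cons]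
      tauto

lemma mem_covered_fold (D : List (List Int)) (s : List Int) (x : Int) :
    x ∈ D.foldl (fun cov Ej => Ej.foldl (fun cov u => if u ∈ cov then cov else cov ++ [u]) cov) s
      ↔ x ∈ s ∨ ∃ Ej ∈ D, x ∈ Ej := by
  induction D generalizing s with
  | nil => simp
  | cons Ej D ih =>
    simp only [List.foldl_cons, ih, mem_dedup_fold]
    constructor
    · rintro (⟨h | h⟩ | h)
      · exact Or.inl h
      · exact Or.inr ⟨Ej, by simp, h⟩
      · rcases h with ⟨e, he, hx⟩; exact Or.inr ⟨e, by simp [he], hx⟩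
    · rintro (h | ⟨e, he, hx⟩)
      · exact Or.inl (Or.inl h)
      · rcases List.mem_cons.mp he with rfl | he
        · exact Or.inl (Or.inr hx)
        · exact Or.inr ⟨e, he, hx⟩

lemma mem_pvCoveredA (D : List (List Int)) (x : Int) :
    x ∈ pvCoveredA D ↔ 0 < pvCnt D x := by
  rw [pvCoveredA, mem_covered_fold, pvCnt, List.countP_pos_iff]
  simp

lemma pvScoreA_eq (U : List Int) (w init : Int) (D : List (List Int)) :
    pvScoreA U w (pvCoveredA D) init = init + w * (pvUncov U D : Int) := by
  induction U generalizing init with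
  | nil => simp [pvScoreA, pvUncov]
  | cons u U ih =>
    by_cases h : u ∈ pvCoveredA D
    · have h0 : ¬ pvCnt D u = 0 := by
        have := (mem_pvCoveredA D u).mp h; omega
      simp only [pvScoreA, List.foldl_cons, if_pos h]
      rw [show (List.foldl _ init U : Int) = pvScoreA U w (pvCoveredA D) init from rfl, ih]
      simp [pvUncov, h0]
    · have h0 : pvCnt D u = 0 := by
        by_contra hc
        exact h ((mem_pvCoveredA D u).mpr (by omega))
      simp only [pvScoreA, List.foldl_cons, if_neg h]
      rw [show (List.foldl _ (init + w) U : Int) = pvScoreA U w (pvCoveredA D) (init + w) from rfl, ih]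
      simp only [pvUncov, List.countP_cons, h0, decide_true, if_pos]
      push_cast
      ring

lemma countP_split {α : Type} (l : List α) (p q r : α → Bool)
    (h : ∀ u ∈ l, p u = (q u || r u)) (hd : ∀ u ∈ l, ¬(q u = true ∧ r u = true)) :
    l.countP p = l.countP q + l.countP r := by
  induction l with
  | nil => simp
  | cons u l ih =>
    have hu := h u (by simp)
    have hdu := hd u (by simp)
    simp only [List.countP_cons, hu]
    rw [ih (fun v hv => h v (by simp [hv])) (fun v hv => hd v (by simp [hv]))]
    cases hq : q u <;> cases hr : r u <;> simp [hq, hr] at hdu ⊢ <;> omega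

lemma pvCnt_erase (C : List (List Int)) (Ei : List Int) (h : Ei ∈ C) (u : Int) :
    pvCnt C u = (if u ∈ Ei then 1 else 0) + pvCnt (C.erase Ei) u := by
  have hp := List.perm_cons_erase h
  rw [pvCnt, hp.countP_eq, List.countP_cons]
  by_cases hm : u ∈ Ei
  · simp [pvCnt, hm]; omega
  · simp [pvCnt, hm]

lemma pvUncov_erase (U : List Int) (C : List (List Int)) (Ei : List Int) (h : Ei ∈ C) :
    pvUncov U (C.erase Ei)
      = pvUncov U C + U.countP (fun u => decide (u ∈ Ei ∧ pvCnt C u = 1)) := by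
  rw [pvUncov, pvUncov]
  apply countP_split
  · intro u _
    have hce := pvCnt_erase C Ei h u
    rw [Bool.eq_iff_iff]
    simp only [Bool.or_eq_true, decide_eq_true_eq]
    by_cases hm : u ∈ Ei
    · rw [if_pos hm] at hce
      simp only [hm, true_and]
      omega
    · rw [if_neg hm] at hce
      simp only [hm, false_and, or_false]
      omega
  · intro u _
    have hce := pvCnt_erase C Ei h u
    simp only [decide_eq_true_eq]
    by_cases hm : u ∈ Ei
    · rw [if_pos hm] at hce
      simp only [hm, true_and]
      omega
    · rw [if_neg hm] at hce
      simp only [hm, false_and]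
      tauto

lemma pvCnt_append (C : List (List Int)) (Ei : List Int) (u : Int) :
    pvCnt (C ++ [Ei]) u = pvCnt C u + (if u ∈ Ei then 1 else 0) := by
  simp only [pvCnt, List.countP_append, List.countP_cons, List.countP_nil]
  by_cases hm : u ∈ Ei <;> simp [hm]

lemma pvUncov_append (U : List Int) (C : List (List Int)) (Ei : List Int) :
    pvUncov U C
      = pvUncov U (C ++ [Ei]) + U.countP (fun u => decide (u ∈ Ei ∧ pvCnt C u = 0)) := by
  rw [pvUncov, pvUncov]
  apply countP_split
  · intro u _
    have hce := pvCnt_append C Ei u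
    rw [Bool.eq_iff_iff]
    simp only [Bool.or_eq_true, decide_eq_true_eq]
    by_cases hm : u ∈ Ei
    · rw [if_pos hm] at hce
      simp only [hm, true_and]
      omega
    · rw [if_neg hm] at hce
      simp only [hm, false_and, or_false]
      omega
  · intro u _
    have hce := pvCnt_append C Ei u
    simp only [decide_eq_true_eq]
    by_cases hm : u ∈ Ei
    · rw [if_pos hm] at hce
      simp only [hm, true_and]
      omega
    · rw [if_neg hm] at hce
      simp only [hm, false_and]
      tauto

lemma cnt_getD_aux (C : List (List Int)) (d : PySem.Dict Int Int) (u : Int) :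
    (C.foldl (fun d Ej => (PySem.List.dedup Ej).foldl (fun d u => d.insert u (d.getD u 0 + 1)) d) d).getD u 0
      = d.getD u 0 + (pvCnt C u : Int) := by
  induction C generalizing d with
  | nil => simp [pvCnt]
  | cons Ej C ih =>
    simp only [List.foldl_cons]
    rw [ih, PySem.Dict.getD_foldl_insert_add_one]
    have hc : (PySem.List.dedup Ej).count u = if u ∈ Ej then 1 else 0 := by
      by_cases hm : u ∈ Ej
      · rw [if_pos hm]
        exact List.count_eq_one_of_mem (PySem.List.nodup_dedup Ej) (by simp [hm])
      · rw [if_neg hm]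
        exact List.count_eq_zero_of_not_mem (by simp [hm])
    rw [hc]
    simp only [pvCnt, List.countP_cons]
    by_cases hm : u ∈ Ej <;> simp [hm] <;> ring

lemma cnt_getD (C : List (List Int)) (u : Int) :
    (pvCntB C).getD u 0 = (pvCnt C u : Int) := by
  rw [pvCntB, cnt_getD_aux]
  simp

lemma baseUncov_eq (U : List Int) (C : List (List Int)) :
    U.foldl (fun n u => if (pvCntB C).getD u 0 = 0 then n + 1 else n) 0 = (pvUncov U C : Int) := by
  rw [PySem.List.foldl_ite_add_one, pvUncov]
  rw [zero_add, Nat.cast_inj]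
  apply List.countP_congr
  intro u _
  simp [cnt_getD]

lemma delta_fold_eq (U : List Int) (C : List (List Int)) (Ei : List Int) (m : Nat) :
    U.foldl (fun n u => if u ∈ PySem.Set.ofList Ei ∧ (pvCntB C).getD u 0 = (m : Int) then n + 1 else n) 0
      = (U.countP (fun u => decide (u ∈ Ei ∧ pvCnt C u = m)) : Int) := by
  rw [PySem.List.foldl_ite_add_one, zero_add, Nat.cast_inj]
  apply List.countP_congr
  intro u _
  simp [cnt_getD, PySem.Set.mem_ofList, Nat.cast_inj]

/-- the score B assigns to candidate `Ei` equals `len(toggle) + w * uncovered(toggle)` -/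
lemma sc_eq (U : List Int) (C : List (List Int)) (Ei : List Int) (w : Int) :
    (if Ei ∈ C then
        (C.length : Int) - 1 +
          w * ((pvUncov U C : Int) + U.foldl (fun n u => if u ∈ PySem.Set.ofList Ei ∧ (pvCntB C).getD u 0 = 1 then n + 1 else n) 0)
      else
        (C.length : Int) + 1 +
          w * ((pvUncov U C : Int) - U.foldl (fun n u => if u ∈ PySem.Set.ofList Ei ∧ (pvCntB C).getD u 0 = 0 then n + 1 else n) 0))
      = ((pvToggle C Ei).length : Int) + w * (pvUncov U (pvToggle C Ei) : Int) := by
  by_cases h : Ei ∈ C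
  · rw [if_pos h]
    have hrem : pvToggle C Ei = C.erase Ei := by
      simp [pvToggle, h, PySem.List.remove?_eq_some_erase C Ei h]
    rw [hrem]
    have hlen : (C.erase Ei).length + 1 = C.length := by
      rw [List.length_erase_of_mem h]
      have := List.length_pos_of_mem h
      omega
    have h1 := delta_fold_eq U C Ei 1
    simp only [Nat.cast_one] at h1
    rw [h1]
    have huv := pvUncov_erase U C Ei h
    have : ((C.erase Ei).length : Int) = (C.length : Int) - 1 := by omega
    rw [this, huv]
    push_cast
    ring
  · rw [if_neg h]
    have hadd : pvToggle C Ei = C ++ [Ei] := by simp [pvToggle, h]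
    rw [hadd]
    have h0 := delta_fold_eq U C Ei 0
    simp only [Nat.cast_zero] at h0
    rw [h0]
    have huv := pvUncov_append U C Ei
    have hlen : ((C ++ [Ei]).length : Int) = (C.length : Int) + 1 := by
      simp
    rw [hlen, huv]
    push_cast
    ring

/-- invariant relating A's fold state to B's fold state -/
def pvRel (E C : List (List Int)) (accA : List (List Int) × Int) (accB : Int × Int) : Prop :=
  accB.2 = accA.2 ∧
    ((accB.1 = -1 ∧ accA.1 = C) ∨
      ∃ n : Nat, accB.1 = (n : Int) ∧ ∃ e, E[n]? = some e ∧ accA.1 = pvToggle C e)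

lemma main_fold (U : List Int) (E C : List (List Int)) (l : List (List Int)) (k : Nat)
    (hEl : ∀ (j : Nat) (a : List Int), l[j]? = some a → E[k + j]? = some a)
    (accA : List (List Int) × Int) (accB : Int × Int)
    (hrel : pvRel E C accA accB) :
    pvRel E C
      (l.foldl (fun (st : List (List Int) × Int) Ei =>
        let newC := if Ei ∈ C then (PySem.List.remove? C Ei).getD C else C ++ [Ei]
        let covered := pvCoveredA newC
        let score := pvScoreA U ((E.length : Int) + 1) covered (newC.length : Int)
        if score < st.2 then (newC, score) else st) accA)
      ((PySem.List.enumerate l (k : Int)).foldl (fun (st : Int × Int) p =>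
        let s : PySem.Set Int := PySem.Set.ofList p.2
        let sc : Int :=
          if p.2 ∈ C then
            (C.length : Int) - 1 +
              ((E.length : Int) + 1) * ((pvUncov U C : Int) + U.foldl (fun n u => if u ∈ s ∧ (pvCntB C).getD u 0 = 1 then n + 1 else n) 0)
          else
            (C.length : Int) + 1 +
              ((E.length : Int) + 1) * ((pvUncov U C : Int) - U.foldl (fun n u => if u ∈ s ∧ (pvCntB C).getD u 0 = 0 then n + 1 else n) 0)
        if sc < st.2 then (p.1, sc) else st) accB) := by
  induction l generalizing k accA accB with
  | nil => simpa [PySem.List.enumerate_nil]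
  | cons Ei l ih =>
    rw [PySem.List.enumerate_cons, List.foldl_cons, List.foldl_cons]
    have hsc : (if Ei ∈ C then
          (C.length : Int) - 1 +
            ((E.length : Int) + 1) * ((pvUncov U C : Int) + U.foldl (fun n u => if u ∈ PySem.Set.ofList Ei ∧ (pvCntB C).getD u 0 = 1 then n + 1 else n) 0)
        else
          (C.length : Int) + 1 +
            ((E.length : Int) + 1) * ((pvUncov U C : Int) - U.foldl (fun n u => if u ∈ PySem.Set.ofList Ei ∧ (pvCntB C).getD u 0 = 0 then n + 1 else n) 0))
        = pvScoreA U ((E.length : Int) + 1) (pvCoveredA (pvToggle C Ei)) ((pvToggle C Ei).length : Int) := by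
      rw [sc_eq, pvScoreA_eq]
    have hTog : (if Ei ∈ C then (PySem.List.remove? C Ei).getD C else C ++ [Ei]) = pvToggle C Ei := rfl
    have hstep : pvRel E C
        (if pvScoreA U ((E.length : Int) + 1) (pvCoveredA (pvToggle C Ei)) ((pvToggle C Ei).length : Int) < accA.2
          then (pvToggle C Ei, pvScoreA U ((E.length : Int) + 1) (pvCoveredA (pvToggle C Ei)) ((pvToggle C Ei).length : Int)) else accA)
        (if pvScoreA U ((E.length : Int) + 1) (pvCoveredA (pvToggle C Ei)) ((pvToggle C Ei).length : Int) < accB.2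
          then ((k : Int), pvScoreA U ((E.length : Int) + 1) (pvCoveredA (pvToggle C Ei)) ((pvToggle C Ei).length : Int)) else accB) := by
      rw [hrel.1]
      split_ifs with hlt
      · refine ⟨rfl, Or.inr ⟨k, rfl, Ei, ?_, rfl⟩⟩
        have := hEl 0 Ei (by simp)
        simpa using this
      · exact hrel
    have hk1 : ((k : Int) + 1) = ((k + 1 : Nat) : Int) := by push_cast; ring
    rw [hk1]
    have harg : ∀ (j : Nat) (a : List Int), l[j]? = some a → E[(k + 1) + j]? = some a := by
      intro j a hj
      have := hEl (j + 1) a (by simpa using hj)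
      simpa [Nat.add_assoc, Nat.add_comm 1 j] using this
    refine ih (k + 1) harg _ _ ?_
    simp only []
    rw [hsc, hTog]
    exact hstep

-- ===== VERDICT (by name: the statement is the Claim_ definition above) =====
theorem fun4_spec : Claim_equal_fun4 := by
  intro U E C _
  unfold Spec_fun4 fun4 fun4_alt
  simp only []
  rw [baseUncov_eq U C]
  have hrel0 : pvRel E C (C, pvScoreA U ((E.length : Int) + 1) (pvCoveredA C) (C.length : Int))
      (-1, (C.length : Int) + ((E.length : Int) + 1) * (pvUncov U C : Int)) := by
    refine ⟨?_, Or.inl ⟨rfl, rfl⟩⟩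
    simp only [pvScoreA_eq]
  have hm := main_fold U E C E 0 (by intro j a hj; simpa using hj) _ _ hrel0
  push_cast at hm
  obtain ⟨h2, h1⟩ := hm
  rcases h1 with ⟨hB1, hA1⟩ | ⟨n, hBn, e, hEn, hAe⟩
  · rw [hB1, if_pos (by norm_num : (-1 : Int) < 0)]
    exact hA1
  · rw [hBn, if_neg (by omega)]
    simp only [PySem.List.pyGet?_natCast, hEn, Option.getD_some]
    rw [hAe, pvToggle]
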